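-- pv_equiv track=rewrite | github.com/bryanvielma/MUESTREO_MACRO | correos_muestreos.py | calcular_tamano_muestra
-- ===== SOURCE A (Python) =====
-- def calcular_tamano_muestra(cantidad):
--     rangos = [(8,2),(15,3),(25,5),(50,8),(90,13),(150,20),(280,40),
--               (500,60),(1200,80),(3200,140),(10000,200),(35000,320),
--               (150000,500),(500000,800)]
--     for limite, muestra in rangos:
--         if cantidad <= limite:
--             return muestra
--     return 1260
-- ===== SOURCE B (Python) =====
-- def calcular_tamano_muestra(cantidad):
--     limits = [8, 15, 25, 50, 90, 150, 280, 500, 1200, 3200, 10000, 35000, 150000, 500000]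
--     samples = [2, 3, 5, 8, 13, 20, 40, 60, 80, 140, 200, 320, 500, 800]
--     lo, hi = 0, len(limits)
--     while lo < hi:
--         mid = (lo + hi) // 2
--         if limits[mid] < cantidad:
--             lo = mid + 1
--         else:
--             hi = mid
--     return samples[lo] if lo < len(samples) else 1260
-- ===== Notes on version B (the rewrite author's own statement) =====
-- stated objective: alternative
-- what changed: Replaced the sequential first-match scan over (limit, sample) pairs with a hand-written binary search (bisect_left) over the sorted threshold list paired with a parallel sample list, keeping the same fall-through default when the index runs past the table.
import Mathlib
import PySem

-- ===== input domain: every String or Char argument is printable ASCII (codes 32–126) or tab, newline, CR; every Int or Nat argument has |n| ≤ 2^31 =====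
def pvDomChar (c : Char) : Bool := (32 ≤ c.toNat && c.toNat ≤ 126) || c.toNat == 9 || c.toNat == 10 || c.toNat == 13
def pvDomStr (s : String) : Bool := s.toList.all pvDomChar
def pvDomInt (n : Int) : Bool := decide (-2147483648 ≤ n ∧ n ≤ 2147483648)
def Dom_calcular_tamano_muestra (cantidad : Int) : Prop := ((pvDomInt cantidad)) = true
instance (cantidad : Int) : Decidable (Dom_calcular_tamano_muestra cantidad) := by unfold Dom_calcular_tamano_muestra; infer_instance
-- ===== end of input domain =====

-- B replaces A's sequential first-match scan over (limit, sample) pairs with a binary search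
-- (bisect_left) over a sorted threshold list and a parallel sample list (alternative decomposition).


-- ===== PORT A =====
-- first-match scan over the (limite, muestra) pairs; [] falls through to 1260
def pvScanA (cantidad : Int) : List (Int × Int) → Int
  | [] => 1260
  | (limite, muestra) :: rest =>
      if cantidad ≤ limite then muestra else pvScanA cantidad rest

def calcular_tamano_muestra (cantidad : Int) : Int :=
  pvScanA cantidad
    [(8,2),(15,3),(25,5),(50,8),(90,13),(150,20),(280,40),
     (500,60),(1200,80),(3200,140),(10000,200),(35000,320),
     (150000,500),(500000,800)]

-- ===== PORT B =====
-- hand-written bisect_left loop of Source B; the fuel argument (initial hi - lo) only makes the loop structural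
def pvBisect (limits : List Int) (cantidad : Int) : Nat → Nat → Nat → Nat
  | 0, lo, _ => lo
  | fuel + 1, lo, hi =>
    if lo < hi then
      if limits.getD ((lo + hi) / 2) 0 < cantidad then
        pvBisect limits cantidad fuel ((lo + hi) / 2 + 1) hi
      else pvBisect limits cantidad fuel lo ((lo + hi) / 2)
    else lo

def calcular_tamano_muestra_alt (cantidad : Int) : Int :=
  let limits : List Int := [8, 15, 25, 50, 90, 150, 280, 500, 1200, 3200, 10000, 35000, 150000, 500000]
  let samples : List Int := [2, 3, 5, 8, 13, 20, 40, 60, 80, 140, 200, 320, 500, 800]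
  let lo := pvBisect limits cantidad limits.length 0 limits.length
  if lo < samples.length then samples.getD lo 0 else 1260

-- ===== PRECONDITION & SPEC =====
def Spec_calcular_tamano_muestra (cantidad : Int) (out : Int) : Prop := out = calcular_tamano_muestra_alt cantidad
instance (cantidad : Int) (out : Int) : Decidable (Spec_calcular_tamano_muestra cantidad out) := by unfold Spec_calcular_tamano_muestra; infer_instance

-- ===== CLAIM (what is proved, stated in full; the proofs are below) =====
def Claim_equal_calcular_tamano_muestra : Prop := ∀ (cantidad : Int), Dom_calcular_tamano_muestra cantidad → Spec_calcular_tamano_muestra cantidad (calcular_tamano_muestra cantidad)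

-- ===== LEMMAS AND PROOFS =====

-- ===== VERDICT (by name: the statement is the Claim_ definition above) =====
-- pvBisect stays within [lo, hi] and its boundary probes bracket c:
-- below the returned index the last probed element is < c, at it the probe is ≥ c.
-- fuel-indexed bisect stays within [lo, hi] and its boundary probes bracket c:
-- below the returned index the last probed element is < c, at it the probe is ≥ c.
lemma pvBisect_inv (L : List Int) (c : Int) :
    ∀ (fuel lo hi : Nat), hi - lo ≤ fuel → lo ≤ hi →
      lo ≤ pvBisect L c fuel lo hi ∧ pvBisect L c fuel lo hi ≤ hi ∧
      (lo < pvBisect L c fuel lo hi → L.getD (pvBisect L c fuel lo hi - 1) 0 < c) ∧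
      (pvBisect L c fuel lo hi < hi → ¬ L.getD (pvBisect L c fuel lo hi) 0 < c) := by
  intro fuel
  induction fuel with
  | zero =>
    intro lo hi hn hle
    have : lo = hi := by omega
    subst this
    simp only [pvBisect]
    exact ⟨le_refl _, le_refl _, fun h => absurd h (Nat.lt_irrefl _), fun h => absurd h (Nat.lt_irrefl _)⟩
  | succ fuel ih =>
    intro lo hi hn hle
    simp only [pvBisect]
    by_cases hlt : lo < hi
    · simp only [hlt, if_true]
      by_cases hp : L.getD ((lo + hi) / 2) 0 < c
      · simp only [hp, if_true]
        obtain ⟨h1, h2, h3, h4⟩ := ih ((lo + hi) / 2 + 1) hi (by omega) (by omega)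
        refine ⟨by omega, h2, ?_, h4⟩
        intro hgt
        rcases Nat.lt_or_ge ((lo + hi) / 2 + 1) (pvBisect L c fuel ((lo + hi) / 2 + 1) hi) with h | h
        · exact h3 h
        · have heq : pvBisect L c fuel ((lo + hi) / 2 + 1) hi = (lo + hi) / 2 + 1 := by omega
          rw [heq]
          simpa using hp
      · simp only [hp, if_false]
        obtain ⟨h1, h2, h3, h4⟩ := ih lo ((lo + hi) / 2) (by omega) (by omega)
        refine ⟨h1, by omega, h3, ?_⟩
        intro hlt2
        rcases Nat.lt_or_ge (pvBisect L c fuel lo ((lo + hi) / 2)) ((lo + hi) / 2) with h | h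
        · exact h4 h
        · have heq : pvBisect L c fuel lo ((lo + hi) / 2) = (lo + hi) / 2 := by omega
          rw [heq]
          exact hp
    · simp only [hlt, if_false]
      exact ⟨le_refl _, hle, fun h => absurd h (Nat.lt_irrefl _), fun h => h.elim⟩

set_option maxHeartbeats 800000 in
theorem calcular_tamano_muestra_spec : Claim_equal_calcular_tamano_muestra := by
  intro c _
  unfold Spec_calcular_tamano_muestra calcular_tamano_muestra calcular_tamano_muestra_alt
  show pvScanA c [(8,2),(15,3),(25,5),(50,8),(90,13),(150,20),(280,40),
      (500,60),(1200,80),(3200,140),(10000,200),(35000,320),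
      (150000,500),(500000,800)] =
    (if pvBisect [8, 15, 25, 50, 90, 150, 280, 500, 1200, 3200, 10000, 35000, 150000, 500000] c 14 0 14 < 14
     then ([2, 3, 5, 8, 13, 20, 40, 60, 80, 140, 200, 320, 500, 800] : List Int).getD
            (pvBisect [8, 15, 25, 50, 90, 150, 280, 500, 1200, 3200, 10000, 35000, 150000, 500000] c 14 0 14) 0
     else 1260)
  obtain ⟨h1, h2, h3, h4⟩ :=
    pvBisect_inv [8, 15, 25, 50, 90, 150, 280, 500, 1200, 3200, 10000, 35000, 150000, 500000] c
      14 0 14 (by omega) (by omega)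
  generalize pvBisect [8, 15, 25, 50, 90, 150, 280, 500, 1200, 3200, 10000, 35000, 150000, 500000] c 14 0 14 = r at h1 h2 h3 h4 ⊢
  interval_cases r
  · norm_num at h3 h4 ⊢
    simp only [pvScanA]
    rw [if_pos (show c ≤ (8:Int) from by omega)]
  · norm_num at h3 h4 ⊢
    simp only [pvScanA]
    rw [if_neg (show ¬(c ≤ (8:Int)) from by omega), if_pos (show c ≤ (15:Int) from by omega)]
  · norm_num at h3 h4 ⊢
    simp only [pvScanA]
    rw [if_neg (show ¬(c ≤ (8:Int)) from by omega), if_neg (show ¬(c ≤ (15:Int)) from by omega), if_pos (show c ≤ (25:Int) from by omega)]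
  · norm_num at h3 h4 ⊢
    simp only [pvScanA]
    rw [if_neg (show ¬(c ≤ (8:Int)) from by omega), if_neg (show ¬(c ≤ (15:Int)) from by omega), if_neg (show ¬(c ≤ (25:Int)) from by omega), if_pos (show c ≤ (50:Int) from by omega)]
  · norm_num at h3 h4 ⊢
    simp only [pvScanA]
    rw [if_neg (show ¬(c ≤ (8:Int)) from by omega), if_neg (show ¬(c ≤ (15:Int)) from by omega), if_neg (show ¬(c ≤ (25:Int)) from by omega), if_neg (show ¬(c ≤ (50:Int)) from by omega), if_pos (show c ≤ (90:Int) from by omega)]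
  · norm_num at h3 h4 ⊢
    simp only [pvScanA]
    rw [if_neg (show ¬(c ≤ (8:Int)) from by omega), if_neg (show ¬(c ≤ (15:Int)) from by omega), if_neg (show ¬(c ≤ (25:Int)) from by omega), if_neg (show ¬(c ≤ (50:Int)) from by omega), if_neg (show ¬(c ≤ (90:Int)) from by omega), if_pos (show c ≤ (150:Int) from by omega)]
  · norm_num at h3 h4 ⊢
    simp only [pvScanA]
    rw [if_neg (show ¬(c ≤ (8:Int)) from by omega), if_neg (show ¬(c ≤ (15:Int)) from by omega), if_neg (show ¬(c ≤ (25:Int)) from by omega), if_neg (show ¬(c ≤ (50:Int)) from by omega), if_neg (show ¬(c ≤ (90:Int)) from by omega), if_neg (show ¬(c ≤ (150:Int)) from by omega), if_pos (show c ≤ (280:Int) from by omega)]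
  · norm_num at h3 h4 ⊢
    simp only [pvScanA]
    rw [if_neg (show ¬(c ≤ (8:Int)) from by omega), if_neg (show ¬(c ≤ (15:Int)) from by omega), if_neg (show ¬(c ≤ (25:Int)) from by omega), if_neg (show ¬(c ≤ (50:Int)) from by omega), if_neg (show ¬(c ≤ (90:Int)) from by omega), if_neg (show ¬(c ≤ (150:Int)) from by omega), if_neg (show ¬(c ≤ (280:Int)) from by omega), if_pos (show c ≤ (500:Int) from by omega)]
  · norm_num at h3 h4 ⊢
    simp only [pvScanA]
    rw [if_neg (show ¬(c ≤ (8:Int)) from by omega), if_neg (show ¬(c ≤ (15:Int)) from by omega), if_neg (show ¬(c ≤ (25:Int)) from by omega), if_neg (show ¬(c ≤ (50:Int)) from by omega), if_neg (show ¬(c ≤ (90:Int)) from by omega), if_neg (show ¬(c ≤ (150:Int)) from by omega), if_neg (show ¬(c ≤ (280:Int)) from by omega), if_neg (show ¬(c ≤ (500:Int)) from by omega), if_pos (show c ≤ (1200:Int) from by omega)]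
  · norm_num at h3 h4 ⊢
    simp only [pvScanA]
    rw [if_neg (show ¬(c ≤ (8:Int)) from by omega), if_neg (show ¬(c ≤ (15:Int)) from by omega), if_neg (show ¬(c ≤ (25:Int)) from by omega), if_neg (show ¬(c ≤ (50:Int)) from by omega), if_neg (show ¬(c ≤ (90:Int)) from by omega), if_neg (show ¬(c ≤ (150:Int)) from by omega), if_neg (show ¬(c ≤ (280:Int)) from by omega), if_neg (show ¬(c ≤ (500:Int)) from by omega), if_neg (show ¬(c ≤ (1200:Int)) from by omega), if_pos (show c ≤ (3200:Int) from by omega)]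
  · norm_num at h3 h4 ⊢
    simp only [pvScanA]
    rw [if_neg (show ¬(c ≤ (8:Int)) from by omega), if_neg (show ¬(c ≤ (15:Int)) from by omega), if_neg (show ¬(c ≤ (25:Int)) from by omega), if_neg (show ¬(c ≤ (50:Int)) from by omega), if_neg (show ¬(c ≤ (90:Int)) from by omega), if_neg (show ¬(c ≤ (150:Int)) from by omega), if_neg (show ¬(c ≤ (280:Int)) from by omega), if_neg (show ¬(c ≤ (500:Int)) from by omega), if_neg (show ¬(c ≤ (1200:Int)) from by omega), if_neg (show ¬(c ≤ (3200:Int)) from by omega), if_pos (show c ≤ (10000:Int) from by omega)]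
  · norm_num at h3 h4 ⊢
    simp only [pvScanA]
    rw [if_neg (show ¬(c ≤ (8:Int)) from by omega), if_neg (show ¬(c ≤ (15:Int)) from by omega), if_neg (show ¬(c ≤ (25:Int)) from by omega), if_neg (show ¬(c ≤ (50:Int)) from by omega), if_neg (show ¬(c ≤ (90:Int)) from by omega), if_neg (show ¬(c ≤ (150:Int)) from by omega), if_neg (show ¬(c ≤ (280:Int)) from by omega), if_neg (show ¬(c ≤ (500:Int)) from by omega), if_neg (show ¬(c ≤ (1200:Int)) from by omega), if_neg (show ¬(c ≤ (3200:Int)) from by omega), if_neg (show ¬(c ≤ (10000:Int)) from by omega), if_pos (show c ≤ (35000:Int) from by omega)]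
  · norm_num at h3 h4 ⊢
    simp only [pvScanA]
    rw [if_neg (show ¬(c ≤ (8:Int)) from by omega), if_neg (show ¬(c ≤ (15:Int)) from by omega), if_neg (show ¬(c ≤ (25:Int)) from by omega), if_neg (show ¬(c ≤ (50:Int)) from by omega), if_neg (show ¬(c ≤ (90:Int)) from by omega), if_neg (show ¬(c ≤ (150:Int)) from by omega), if_neg (show ¬(c ≤ (280:Int)) from by omega), if_neg (show ¬(c ≤ (500:Int)) from by omega), if_neg (show ¬(c ≤ (1200:Int)) from by omega), if_neg (show ¬(c ≤ (3200:Int)) from by omega), if_neg (show ¬(c ≤ (10000:Int)) from by omega), if_neg (show ¬(c ≤ (35000:Int)) from by omega), if_pos (show c ≤ (150000:Int) from by omega)]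
  · norm_num at h3 h4 ⊢
    simp only [pvScanA]
    rw [if_neg (show ¬(c ≤ (8:Int)) from by omega), if_neg (show ¬(c ≤ (15:Int)) from by omega), if_neg (show ¬(c ≤ (25:Int)) from by omega), if_neg (show ¬(c ≤ (50:Int)) from by omega), if_neg (show ¬(c ≤ (90:Int)) from by omega), if_neg (show ¬(c ≤ (150:Int)) from by omega), if_neg (show ¬(c ≤ (280:Int)) from by omega), if_neg (show ¬(c ≤ (500:Int)) from by omega), if_neg (show ¬(c ≤ (1200:Int)) from by omega), if_neg (show ¬(c ≤ (3200:Int)) from by omega), if_neg (show ¬(c ≤ (10000:Int)) from by omega), if_neg (show ¬(c ≤ (35000:Int)) from by omega), if_neg (show ¬(c ≤ (150000:Int)) from by omega), if_pos (show c ≤ (500000:Int) from by omega)]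
  · norm_num at h3 h4 ⊢
    simp only [pvScanA]
    rw [if_neg (show ¬(c ≤ (8:Int)) from by omega), if_neg (show ¬(c ≤ (15:Int)) from by omega), if_neg (show ¬(c ≤ (25:Int)) from by omega), if_neg (show ¬(c ≤ (50:Int)) from by omega), if_neg (show ¬(c ≤ (90:Int)) from by omega), if_neg (show ¬(c ≤ (150:Int)) from by omega), if_neg (show ¬(c ≤ (280:Int)) from by omega), if_neg (show ¬(c ≤ (500:Int)) from by omega), if_neg (show ¬(c ≤ (1200:Int)) from by omega), if_neg (show ¬(c ≤ (3200:Int)) from by omega), if_neg (show ¬(c ≤ (10000:Int)) from by omega), if_neg (show ¬(c ≤ (35000:Int)) from by omega), if_neg (show ¬(c ≤ (150000:Int)) from by omega), if_neg (show ¬(c ≤ (500000:Int)) from by omega)]
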